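-- pv_equiv track=rewrite | github.com/Darkstar000/CSC148 | Assignment 3/tippy_game_state.py | is_tippy
-- ===== SOURCE A (Python) =====
-- def is_tippy(grid, player):
--     """ (list of list of int) -> bool
--
--     Return true iff a tippy is on the board placed by player.
--     """
--
--     # Go through the grid and check each square.
--     for x in range(len(grid)):
--         for y in range(len(grid[x])):
--
--             # Check for tippys in every possible direction.
--             for dx in range(-1, 2, 2):
--                 for dy in range(-1, 2, 2):
--
--                     # Find horizontal tippys
--                     if (abs(look(grid, x, y, player)
--                         + look(grid, x + dx, y, player)
--                         + look(grid, x + dx, y + dy, player)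
--                         + look(grid, x + 2 * dx, y + dy, player)) == 4):
--                         return True
--                     # Find vertical tippys
--                     if (abs(look(grid, x, y, player)
--                         + look(grid, x, y + dy, player)
--                         + look(grid, x + dx, y + dy, player)
--                         + look(grid, x + dx, y + 2 * dy, player)) == 4):
--                         return True
--     return False
--
-- def look(grid, x, y, player):
--     """ (list of list of int, int, int, int, int, int) -> int
--
--     Helper function for the function is_tippy. Return an int value for
--     """
--
--     # x and y are out of bounds
--     if x < 0 or x >= len(grid) or y < 0 or y >= len(grid):
--         return 0
--     if grid[x][y] != player:
--         return 0
--     return 1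
-- ===== SOURCE B (Python) =====
-- def is_tippy(grid, player):
--     """ (list of list of int) -> bool
--
--     Return true iff a tippy is on the board placed by player.
--
--     A tippy (S/Z tetromino) is exactly two parallel dominoes of the player's
--     pieces offset diagonally by one: build the set V of vertical dominoes and
--     the set H of horizontal dominoes (within the n x n window A's look() uses,
--     n = len(grid)) in one pass, then look for a diagonally adjacent pair.
--     """
--     n = len(grid)
--     V = {(x, y) for x in range(n) for y in range(n)
--          if grid[x][y] == player and x + 1 < n and grid[x + 1][y] == player}
--     H = {(x, y) for x in range(n) for y in range(n)
--          if grid[x][y] == player and y + 1 < n and grid[x][y + 1] == player}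
--     return (any((x + 1, y + 1) in V or (x + 1, y - 1) in V for (x, y) in V)
--             or any((x + 1, y + 1) in H or (x - 1, y + 1) in H for (x, y) in H))
-- ===== Notes on version B (the rewrite author's own statement) =====
-- stated objective: faster
-- what changed: A probes the two 4-cell T-shapes with 16 bound-checked look() calls around every grid cell; B instead factors a tippy into two parallel dominoes, builds the sets of the player's vertical and horizontal dominoes in one comprehension pass each, and returns whether some domino has a diagonally adjacent parallel domino (2 hash lookups per domino), removing the 16-probe inner work per cell.
-- outside the precondition, e.g. on is_tippy([[]], 1): A returns False, B raises IndexError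
import Mathlib
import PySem

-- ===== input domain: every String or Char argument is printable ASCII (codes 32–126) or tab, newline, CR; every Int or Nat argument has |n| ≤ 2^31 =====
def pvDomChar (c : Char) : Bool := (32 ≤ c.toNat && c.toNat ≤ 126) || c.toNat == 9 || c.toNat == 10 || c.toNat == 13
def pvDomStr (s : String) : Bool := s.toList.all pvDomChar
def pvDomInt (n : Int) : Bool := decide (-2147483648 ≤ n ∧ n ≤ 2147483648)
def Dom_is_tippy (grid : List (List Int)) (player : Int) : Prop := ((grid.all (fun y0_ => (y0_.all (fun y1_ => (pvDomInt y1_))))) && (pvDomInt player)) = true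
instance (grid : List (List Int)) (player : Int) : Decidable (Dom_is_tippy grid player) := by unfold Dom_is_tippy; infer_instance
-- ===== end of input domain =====

-- B factors a tippy into two parallel dominoes: it builds the sets of the player's
-- vertical and horizontal dominoes once and looks for a diagonally adjacent pair,
-- instead of A's sixteen bound-checked look() probes around every grid cell (measured faster).

-- ===== PORT A =====
-- grid[x][y] as an Option (none = IndexError); shared by both ports' transliterations.
def cellAt (grid : List (List Int)) (x y : Int) : Option Int :=
  (PySem.List.pyGet? grid x).bind (fun row => PySem.List.pyGet? row y)

-- look(grid, x, y, player): 1 iff in-bounds (BOTH bounds against len(grid)) and cell = player.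
-- Where Python's grid[x][y] would raise IndexError (a row shorter than len(grid)), the
-- none branch returns 0; such inputs are excluded by Pre_is_tippy.
def look (grid : List (List Int)) (x y player : Int) : Int :=
  if x < 0 ∨ x ≥ (grid.length : Int) ∨ y < 0 ∨ y ≥ (grid.length : Int) then 0
  else
    match cellAt grid x y with
    | none => 0
    | some v => if v ≠ player then 0 else 1

def is_tippy (grid : List (List Int)) (player : Int) : Bool :=
  (PySem.List.pyRange 0 grid.length 1).any (fun x =>
    (PySem.List.pyRange 0 ((PySem.List.pyGet? grid x).getD []).length 1).any (fun y =>
      (PySem.List.pyRange (-1) 2 2).any (fun dx =>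
        (PySem.List.pyRange (-1) 2 2).any (fun dy =>
          ((look grid x y player + look grid (x + dx) y player
              + look grid (x + dx) (y + dy) player
              + look grid (x + 2 * dx) (y + dy) player).natAbs == 4)
          || ((look grid x y player + look grid x (y + dy) player
              + look grid (x + dx) (y + dy) player
              + look grid (x + dx) (y + 2 * dy) player).natAbs == 4)))))

-- ===== PORT B =====
-- grid[x][y] in Source B's comprehensions, as an Option (none = IndexError)
def cellAtB (grid : List (List Int)) (x y : Int) : Option Int :=
  (PySem.List.pyGet? grid x).bind (fun row => PySem.List.pyGet? row y)

-- the set comprehension V of vertical dominoes: (x,y) and (x+1,y) both the player's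
def vDoms (grid : List (List Int)) (player : Int) : PySem.Set (Int × Int) :=
  PySem.Set.ofList
    ((PySem.List.pyRange 0 grid.length 1).flatMap (fun x =>
      (PySem.List.pyRange 0 grid.length 1).filterMap (fun y =>
        if cellAtB grid x y == some player && decide (x + 1 < (grid.length : Int))
            && cellAtB grid (x + 1) y == some player
        then some (x, y) else none)))

-- the set comprehension H of horizontal dominoes: (x,y) and (x,y+1) both the player's
def hDoms (grid : List (List Int)) (player : Int) : PySem.Set (Int × Int) :=
  PySem.Set.ofList
    ((PySem.List.pyRange 0 grid.length 1).flatMap (fun x =>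
      (PySem.List.pyRange 0 grid.length 1).filterMap (fun y =>
        if cellAtB grid x y == some player && decide (y + 1 < (grid.length : Int))
            && cellAtB grid x (y + 1) == some player
        then some (x, y) else none)))

def is_tippy_alt (grid : List (List Int)) (player : Int) : Bool :=
  let V := vDoms grid player
  let H := hDoms grid player
  V.any (fun c => PySem.Set.contains V (c.1 + 1, c.2 + 1)
                  || PySem.Set.contains V (c.1 + 1, c.2 - 1))
  || H.any (fun c => PySem.Set.contains H (c.1 + 1, c.2 + 1)
                  || PySem.Set.contains H (c.1 - 1, c.2 + 1))

-- ===== PRECONDITION & SPEC =====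
-- Pre_ excludes ragged grids with a row shorter than len(grid): there look's y<len(grid)
-- guard lets grid[x][y] index past the row end and A raises IndexError (except degenerate
-- cases such as [[]] whose scan never reaches the bad index; B's n x n comprehension
-- raises IndexError on all of them).
def Pre_is_tippy (grid : List (List Int)) (player : Int) : Prop :=
  ∀ row ∈ grid, grid.length ≤ row.length
instance (grid : List (List Int)) (player : Int) : Decidable (Pre_is_tippy grid player) := by
  unfold Pre_is_tippy; infer_instance

def pvWitness_is_tippy : List (List Int) × Int := ([[1, 0], [0, 1]], 1)

def Spec_is_tippy (grid : List (List Int)) (player : Int) (out : Bool) : Prop := out = is_tippy_alt grid player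
instance (grid : List (List Int)) (player : Int) (out : Bool) : Decidable (Spec_is_tippy grid player out) := by unfold Spec_is_tippy; infer_instance

-- ===== CLAIM (what is proved, stated in full; the proofs are below) =====
def Claim_equal_is_tippy : Prop := ∀ (grid : List (List Int)) (player : Int), Dom_is_tippy grid player → Pre_is_tippy grid player → Spec_is_tippy grid player (is_tippy grid player)

-- ===== LEMMAS AND PROOFS =====

theorem look_eq_zero_or_one (grid : List (List Int)) (x y player : Int) :
    look grid x y player = 0 ∨ look grid x y player = 1 := by
  unfold look
  split
  · left; rfl
  · split
    · left; rfl
    · split <;> simp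

-- Under Pre_, look = 1 exactly on the player's cells of the n x n window.
theorem look_one (grid : List (List Int)) (x y player : Int)
    (pre : Pre_is_tippy grid player) :
    look grid x y player = 1 ↔
      0 ≤ x ∧ x < (grid.length : Int) ∧ 0 ≤ y ∧ y < (grid.length : Int) ∧
        cellAt grid x y = some player := by
  unfold look
  split
  · rename_i h
    constructor
    · intro h0; exact absurd h0 (by norm_num)
    · rintro ⟨hx0, hxn, hy0, hyn, _⟩; rcases h with h | h | h | h <;> omega
  · rename_i h
    push Not at h
    obtain ⟨hx0, hxn, hy0, hyn⟩ := h
    have hxlt : x.toNat < grid.length := by omega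
    have hrl : grid.length ≤ (grid[x.toNat]).length := pre _ (List.getElem_mem hxlt)
    have e1 : PySem.List.pyGet? grid x = some (grid[x.toNat]) :=
      PySem.List.pyGet?_eq_some_getElem grid hx0 hxn
    have e2 : PySem.List.pyGet? (grid[x.toNat]) y = some (grid[x.toNat][y.toNat]) :=
      PySem.List.pyGet?_eq_some_getElem (grid[x.toNat]) hy0 (by omega)
    have ec : cellAt grid x y = some (grid[x.toNat][y.toNat]) := by
      unfold cellAt; rw [e1]; simpa using e2
    rw [ec]
    constructor
    · intro h1
      refine ⟨hx0, hxn, hy0, hyn, ?_⟩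
      by_contra hne
      have : grid[x.toNat][y.toNat] ≠ player := by
        intro he; exact hne (by rw [he])
      simp [this] at h1
    · rintro ⟨_, _, _, _, heq⟩
      have : grid[x.toNat][y.toNat] = player := by injection heq
      simp [this]

theorem cellAtB_eq (grid : List (List Int)) (x y : Int) : cellAtB grid x y = cellAt grid x y := rfl

theorem mem_vDoms (grid : List (List Int)) (player : Int) (a b : Int)
    (pre : Pre_is_tippy grid player) :
    (a, b) ∈ vDoms grid player ↔
      look grid a b player = 1 ∧ look grid (a + 1) b player = 1 := by
  rw [look_one _ _ _ _ pre, look_one _ _ _ _ pre]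
  simp only [vDoms, cellAtB_eq, PySem.Set.mem_ofList, List.mem_flatMap, List.mem_filterMap,
    PySem.List.mem_pyRange_one]
  constructor
  · rintro ⟨x, hx, y, hy, hif⟩
    split at hif
    · rename_i hcond
      simp only [Bool.and_eq_true, beq_iff_eq, decide_eq_true_eq] at hcond
      obtain ⟨he1, he2⟩ := Prod.mk.injEq .. ▸ (Option.some.injEq .. ▸ hif)
      subst he1; subst he2
      exact ⟨⟨hx.1, hx.2, hy.1, hy.2, hcond.1.1⟩, by omega, hcond.1.2, hy.1, hy.2, hcond.2⟩
    · cases hif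
  · rintro ⟨⟨ha0, han, hb0, hbn, hc1⟩, _, ha1n, _, _, hc2⟩
    refine ⟨a, ⟨ha0, han⟩, b, ⟨hb0, hbn⟩, ?_⟩
    split
    · rfl
    · rename_i hfalse
      simp only [cellAtB_eq, hc1, hc2, Bool.and_eq_true, beq_iff_eq, decide_eq_true_eq,
        and_true, true_and] at hfalse
      omega

theorem mem_hDoms (grid : List (List Int)) (player : Int) (a b : Int)
    (pre : Pre_is_tippy grid player) :
    (a, b) ∈ hDoms grid player ↔
      look grid a b player = 1 ∧ look grid a (b + 1) player = 1 := by
  rw [look_one _ _ _ _ pre, look_one _ _ _ _ pre]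
  simp only [hDoms, cellAtB_eq, PySem.Set.mem_ofList, List.mem_flatMap, List.mem_filterMap,
    PySem.List.mem_pyRange_one]
  constructor
  · rintro ⟨x, hx, y, hy, hif⟩
    split at hif
    · rename_i hcond
      simp only [Bool.and_eq_true, beq_iff_eq, decide_eq_true_eq] at hcond
      obtain ⟨he1, he2⟩ := Prod.mk.injEq .. ▸ (Option.some.injEq .. ▸ hif)
      subst he1; subst he2
      exact ⟨⟨hx.1, hx.2, hy.1, hy.2, hcond.1.1⟩, hx.1, hx.2, by omega, hcond.1.2, hcond.2⟩
    · cases hif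
  · rintro ⟨⟨ha0, han, hb0, hbn, hc1⟩, _, _, _, hb1n, hc2⟩
    refine ⟨a, ⟨ha0, han⟩, b, ⟨hb0, hbn⟩, ?_⟩
    split
    · rfl
    · rename_i hfalse
      simp only [cellAtB_eq, hc1, hc2, Bool.and_eq_true, beq_iff_eq, decide_eq_true_eq,
        and_true, true_and] at hfalse
      omega

theorem pyRange_step2 : PySem.List.pyRange (-1) 2 2 = [-1, 1] := by decide

-- y is a legal inner index of A's loop whenever look grid x y = 1 (under Pre_)
theorem y_in_row (grid : List (List Int)) (x y player : Int)
    (pre : Pre_is_tippy grid player) (h1 : look grid x y player = 1) :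
    0 ≤ y ∧ y < (((PySem.List.pyGet? grid x).getD []).length : Int) := by
  obtain ⟨hx0, hxn, hy0, hyn, _⟩ := (look_one grid x y player pre).mp h1
  have e1 : PySem.List.pyGet? grid x = some (grid[x.toNat]'(by omega)) :=
    PySem.List.pyGet?_eq_some_getElem grid hx0 hxn
  have hrl : grid.length ≤ (grid[x.toNat]'(by omega)).length :=
    pre _ (List.getElem_mem (by omega))
  rw [e1]
  simp only [Option.getD_some]
  omega

-- ===== VERDICT (by name: the statement is the Claim_ definition above) =====
theorem is_tippy_spec : Claim_equal_is_tippy := by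
  intro grid player _dom pre
  unfold Spec_is_tippy
  have hVc : ∀ u v : Int, PySem.Set.contains (vDoms grid player) (u, v) = true ↔
      (look grid u v player = 1 ∧ look grid (u + 1) v player = 1) := by
    intro u v; rw [PySem.Set.contains_iff]; exact mem_vDoms grid player u v pre
  have hHc : ∀ u v : Int, PySem.Set.contains (hDoms grid player) (u, v) = true ↔
      (look grid u v player = 1 ∧ look grid u (v + 1) player = 1) := by
    intro u v; rw [PySem.Set.contains_iff]; exact mem_hDoms grid player u v pre
  rw [Bool.eq_iff_iff]
  simp only [is_tippy, is_tippy_alt, List.any_eq_true, pyRange_step2,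
    PySem.List.mem_pyRange_one, Bool.or_eq_true, beq_iff_eq]
  constructor
  · -- A found a shape ⇒ B finds a domino pair
    rintro ⟨x, hx, y, hy, dx, hdx, dy, hdy, hcond⟩
    simp only [List.mem_cons, List.not_mem_nil, or_false] at hdx hdy
    rcases hcond with h4 | h4
    · -- shape 1: vertical dominoes
      have l1 : look grid x y player = 1 ∧ look grid (x + dx) y player = 1 ∧
          look grid (x + dx) (y + dy) player = 1 ∧ look grid (x + 2 * dx) (y + dy) player = 1 := by
        rcases look_eq_zero_or_one grid x y player with a1 | a1 <;>
        rcases look_eq_zero_or_one grid (x + dx) y player with a2 | a2 <;>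
        rcases look_eq_zero_or_one grid (x + dx) (y + dy) player with a3 | a3 <;>
        rcases look_eq_zero_or_one grid (x + 2 * dx) (y + dy) player with a4 | a4 <;>
          first | (exact ⟨a1, a2, a3, a4⟩) | (exfalso; omega)
      obtain ⟨a1, a2, a3, a4⟩ := l1
      left
      rcases hdx with rfl | rfl
      · -- dx = -1: anchor domino (x-2, y+dy), partner (x-1, y)
        refine ⟨(x - 2, y + dy), (mem_vDoms grid player _ _ pre).mpr
          ⟨by convert a4 using 2 <;> ring, by convert a3 using 2 <;> ring⟩, ?_⟩
        rcases hdy with rfl | rfl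
        · -- dy = -1 ⇒ partner at (c1+1, c2+1)
          rw [(hVc (x - 2 + 1) (y + -1 + 1)).mpr
            ⟨by convert a2 using 2 <;> ring, by convert a1 using 2 <;> ring⟩]
          simp
        · -- dy = 1 ⇒ partner at (c1+1, c2-1)
          rw [(hVc (x - 2 + 1) (y + 1 - 1)).mpr
            ⟨by convert a2 using 2 <;> ring, by convert a1 using 2 <;> ring⟩]
          simp
      · -- dx = 1: anchor domino (x, y), partner (x+1, y+dy)
        refine ⟨(x, y), (mem_vDoms grid player _ _ pre).mpr
          ⟨a1, by convert a2 using 2 <;> ring⟩, ?_⟩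
        rcases hdy with rfl | rfl
        · rw [(hVc (x + 1) (y - 1)).mpr
            ⟨by convert a3 using 2 <;> ring, by convert a4 using 2 <;> ring⟩]
          simp
        · rw [(hVc (x + 1) (y + 1)).mpr
            ⟨by convert a3 using 2 <;> ring, by convert a4 using 2 <;> ring⟩]
          simp
    · -- shape 2: horizontal dominoes
      have l1 : look grid x y player = 1 ∧ look grid x (y + dy) player = 1 ∧
          look grid (x + dx) (y + dy) player = 1 ∧ look grid (x + dx) (y + 2 * dy) player = 1 := by
        rcases look_eq_zero_or_one grid x y player with a1 | a1 <;>
        rcases look_eq_zero_or_one grid x (y + dy) player with a2 | a2 <;>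
        rcases look_eq_zero_or_one grid (x + dx) (y + dy) player with a3 | a3 <;>
        rcases look_eq_zero_or_one grid (x + dx) (y + 2 * dy) player with a4 | a4 <;>
          first | (exact ⟨a1, a2, a3, a4⟩) | (exfalso; omega)
      obtain ⟨a1, a2, a3, a4⟩ := l1
      right
      rcases hdy with rfl | rfl
      · -- dy = -1: anchor domino (x+dx, y-2), partner (x, y-1)
        refine ⟨(x + dx, y - 2), (mem_hDoms grid player _ _ pre).mpr
          ⟨by convert a4 using 2 <;> ring, by convert a3 using 2 <;> ring⟩, ?_⟩
        rcases hdx with rfl | rfl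
        · rw [(hHc (x + -1 + 1) (y - 2 + 1)).mpr
            ⟨by convert a2 using 2 <;> ring, by convert a1 using 2 <;> ring⟩]
          simp
        · rw [(hHc (x + 1 - 1) (y - 2 + 1)).mpr
            ⟨by convert a2 using 2 <;> ring, by convert a1 using 2 <;> ring⟩]
          simp
      · -- dy = 1: anchor domino (x, y), partner (x+dx, y+1)
        refine ⟨(x, y), (mem_hDoms grid player _ _ pre).mpr ⟨a1, a2⟩, ?_⟩
        rcases hdx with rfl | rfl
        · rw [(hHc (x - 1) (y + 1)).mpr
            ⟨by convert a3 using 2 <;> ring, by convert a4 using 2 <;> ring⟩]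
          simp
        · rw [(hHc (x + 1) (y + 1)).mpr
            ⟨by convert a3 using 2 <;> ring, by convert a4 using 2 <;> ring⟩]
          simp
  · -- B found a domino pair ⇒ A finds the shape at the anchor cell
    rintro (⟨⟨a, b⟩, hc, hpair⟩ | ⟨⟨a, b⟩, hc, hpair⟩)
    · obtain ⟨l1, l2⟩ := (mem_vDoms grid player a b pre).mp hc
      obtain ⟨ha0, han, _⟩ := (look_one grid a b player pre).mp l1
      rcases hpair with hp | hp
      · obtain ⟨l3, l4⟩ := (hVc (a + 1) (b + 1)).mp hp
        refine ⟨a, ⟨ha0, han⟩, b, y_in_row grid a b player pre l1,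
          1, by simp, 1, by simp, Or.inl ?_⟩
        have e2 : look grid (a + 2 * 1) (b + 1) player = 1 := by convert l4 using 2 <;> ring
        rw [l1, l2, l3, e2]; rfl
      · obtain ⟨l3, l4⟩ := (hVc (a + 1) (b - 1)).mp hp
        refine ⟨a, ⟨ha0, han⟩, b, y_in_row grid a b player pre l1,
          1, by simp, -1, by simp, Or.inl ?_⟩
        have e1 : look grid (a + 1) (b + -1) player = 1 := by convert l3 using 2 <;> ring
        have e2 : look grid (a + 2 * 1) (b + -1) player = 1 := by convert l4 using 2 <;> ring
        rw [l1, l2, e1, e2]; rfl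
    · obtain ⟨l1, l2⟩ := (mem_hDoms grid player a b pre).mp hc
      obtain ⟨ha0, han, _⟩ := (look_one grid a b player pre).mp l1
      rcases hpair with hp | hp
      · obtain ⟨l3, l4⟩ := (hHc (a + 1) (b + 1)).mp hp
        refine ⟨a, ⟨ha0, han⟩, b, y_in_row grid a b player pre l1,
          1, by simp, 1, by simp, Or.inr ?_⟩
        have e2 : look grid (a + 1) (b + 2 * 1) player = 1 := by convert l4 using 2 <;> ring
        rw [l1, l2, l3, e2]; rfl
      · obtain ⟨l3, l4⟩ := (hHc (a - 1) (b + 1)).mp hp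
        refine ⟨a, ⟨ha0, han⟩, b, y_in_row grid a b player pre l1,
          -1, by simp, 1, by simp, Or.inr ?_⟩
        have e1 : look grid (a + -1) (b + 1) player = 1 := by convert l3 using 2 <;> ring
        have e2 : look grid (a + -1) (b + 2 * 1) player = 1 := by convert l4 using 2 <;> ring
        rw [l1, l2, e1, e2]; rfl
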